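-- pv_equiv track=rewrite | github.com/nongdamgom1over/zaksimsamilllll | 프로그래머스/1/133499. 옹알이 （2）/옹알이 （2）.py | solution
-- ===== SOURCE A (Python) =====
-- def solution(babbling):
--     answer = 0
--     words = ["aya", "ye", "woo", "ma"]
--     for b in babbling:
--         idx = 0
--         prev = '' #직전에 사용한 발음
--         ok = True
--
--         while idx<len(b):
--             matched = False
--             for word in words:
--                 if word == prev:
--                     continue
--                 if b.startswith(word,idx):
--                     matched = True
--                     prev = word
--                     idx += len(word)
--                     break
--
--             if not matched:
--                 ok = False
--                 break
--         if ok and idx == len(b):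
--             answer+=1
--
--     return answer
-- ===== SOURCE B (Python) =====
-- def solution(babbling):
--     # Character-level deterministic automaton: the four words start with distinct
--     # letters, so at a token boundary the next character determines the only
--     # possible word; mid-word we just match the remaining expected characters.
--     starts = {'a': 'aya', 'y': 'ye', 'w': 'woo', 'm': 'ma'}
--     count = 0
--     for b in babbling:
--         prev = ''   # last completed word
--         word = ''   # word currently being matched
--         need = ''   # its still-expected suffix
--         dead = False
--         for ch in b:
--             if not need:
--                 w = starts.get(ch)
--                 if w is None or w == prev:
--                     dead = True
--                     break
--                 word, need = w, w[1:]
--             else: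
--                 if ch != need[0]:
--                     dead = True
--                     break
--                 need = need[1:]
--             if not need:
--                 prev = word
--         if not dead and not need:
--             count += 1
--     return count
-- ===== Notes on version B (the rewrite author's own statement) =====
-- stated objective: alternative
-- what changed: Replaces A's index-based greedy parser (startswith over a word list, threading the previous word) with a character-by-character deterministic automaton: at a token boundary the next character picks the unique candidate word (the four words have distinct first letters), and mid-word only the expected suffix is matched; this drops the repeated per-position word-list startswith probing.
import Mathlib
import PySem

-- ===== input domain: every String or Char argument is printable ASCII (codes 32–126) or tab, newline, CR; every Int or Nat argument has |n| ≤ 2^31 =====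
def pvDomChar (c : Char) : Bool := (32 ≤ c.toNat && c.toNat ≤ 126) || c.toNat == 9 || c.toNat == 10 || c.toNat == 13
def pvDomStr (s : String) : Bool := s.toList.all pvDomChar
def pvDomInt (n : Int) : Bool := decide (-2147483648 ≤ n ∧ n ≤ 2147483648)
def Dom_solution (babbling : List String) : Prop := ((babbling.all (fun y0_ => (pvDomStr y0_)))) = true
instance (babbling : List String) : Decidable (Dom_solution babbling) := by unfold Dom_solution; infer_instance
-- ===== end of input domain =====

-- B replaces A's index-based greedy word-list parser with a character-by-character
-- deterministic automaton (the four words have distinct first letters); same cost.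

-- ===== PORT A =====
-- Inner `for word in words` loop of A: skip prev, test b.startswith(word, idx); since the
-- scan only consumes from the front, `b.startswith(word, idx)` on the remaining suffix cs
-- is exactly `word.toList.isPrefixOf cs` (exact: character-by-character prefix test).
def pvTryA : List String → String → List Char → Option (String × List Char)
  | [], _, _ => none
  | w :: ws, prev, cs =>
      if w = prev then pvTryA ws prev cs
      else if w.toList.isPrefixOf cs then some (w, cs.drop w.toList.length)
      else pvTryA ws prev cs

lemma pvTryA_shrink : ∀ (ws : List String) (prev : String) (cs : List Char) (w : String)
    (rest : List Char), (∀ u ∈ ws, u.toList ≠ []) →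
    pvTryA ws prev cs = some (w, rest) → rest.length < cs.length := by
  intro ws
  induction ws with
  | nil => intro prev cs w rest _ h; simp [pvTryA] at h
  | cons u us ih =>
    intro prev cs w rest hne h
    unfold pvTryA at h
    split_ifs at h with h1 h2
    · exact ih prev cs w rest (fun v hv => hne v (List.mem_cons_of_mem _ hv)) h
    · obtain ⟨rfl, rfl⟩ : u = w ∧ cs.drop u.toList.length = rest := by
        simpa only [Option.some.injEq, Prod.mk.injEq] using h
      have hpre : u.toList <+: cs := List.isPrefixOf_iff_prefix.mp h2
      have hle := hpre.length_le
      have hpos : 0 < u.toList.length :=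
        List.length_pos_iff.mpr (hne u (List.mem_cons_self))
      simp only [List.length_drop]
      omega
    · exact ih prev cs w rest (fun v hv => hne v (List.mem_cons_of_mem _ hv)) h

-- A's while loop, as recursion on the remaining suffix (idx becomes "drop idx";
-- the loop exits with idx == len(b) exactly when the suffix is empty).
def pvLoopA : List Char → String → Bool
  | [], _ => true
  | c :: cs', prev =>
    match hm : pvTryA ["aya", "ye", "woo", "ma"] prev (c :: cs') with
    | some (w, rest) => pvLoopA rest w
    | none => false
termination_by cs _ => cs.length
decreasing_by
  exact pvTryA_shrink _ _ _ _ _ (by decide) hm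

def solution (babbling : List String) : Int :=
  babbling.foldl (fun answer b => if pvLoopA b.toList "" then answer + 1 else answer) 0

-- ===== PORT B =====
-- B's `starts.get(ch)`: the 4-entry dict dispatch on the first letter (exact: the
-- dict is a fixed literal, ported as the corresponding case analysis).
def pvStarts (ch : Char) : Option String :=
  if ch = 'a' then some "aya"
  else if ch = 'y' then some "ye"
  else if ch = 'w' then some "woo"
  else if ch = 'm' then some "ma" else none

-- B's `for ch in b` automaton loop: state (prev = last completed word,
-- word = word being matched, need = its still-expected suffix); `break` with
-- dead=True makes the final `if not dead and not need` false, hence `false` here.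
def pvDFA : List Char → String → String → List Char → Bool
  | [], _, _, need => need.isEmpty
  | ch :: rest, prev, word, need =>
    match need with
    | [] =>
      match pvStarts ch with
      | none => false
      | some w =>
        if w = prev then false
        else
          let need' := w.toList.drop 1
          if need'.isEmpty then pvDFA rest w w need' else pvDFA rest prev w need'
    | n0 :: ntl =>
      if ch = n0 then
        if ntl.isEmpty then pvDFA rest word word ntl else pvDFA rest prev word ntl
      else false

def solution_alt (babbling : List String) : Int :=
  babbling.foldl
    (fun count b => if pvDFA b.toList "" "" [] then count + 1 else count) 0

-- ===== PRECONDITION & SPEC =====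
def Spec_solution (babbling : List String) (out : Int) : Prop := out = solution_alt babbling
instance (babbling : List String) (out : Int) : Decidable (Spec_solution babbling out) := by unfold Spec_solution; infer_instance

-- ===== CLAIM (what is proved, stated in full; the proofs are below) =====
def Claim_equal_solution : Prop := ∀ (babbling : List String), Dom_solution babbling → Spec_solution babbling (solution babbling)

-- ===== LEMMAS AND PROOFS =====

lemma pvLoopA_step_some (c : Char) (cs' : List Char) (prev w : String) (rest : List Char)
    (h : pvTryA ["aya", "ye", "woo", "ma"] prev (c :: cs') = some (w, rest)) :
    pvLoopA (c :: cs') prev = pvLoopA rest w := by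
  rw [pvLoopA]; split <;> simp_all

lemma pvLoopA_step_none (c : Char) (cs' : List Char) (prev : String)
    (h : pvTryA ["aya", "ye", "woo", "ma"] prev (c :: cs') = none) :
    pvLoopA (c :: cs') prev = false := by
  rw [pvLoopA]; split <;> simp_all

-- One-step unfoldings of the automaton (definitional).
lemma pvDFA_step_start (ch : Char) (rest : List Char) (prev word : String) :
    pvDFA (ch :: rest) prev word [] =
      (match pvStarts ch with
       | none => false
       | some w =>
         if w = prev then false
         else
           let need' := w.toList.drop 1
           if need'.isEmpty then pvDFA rest w w need' else pvDFA rest prev w need') := rfl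

lemma pvDFA_step_mid (ch : Char) (rest : List Char) (prev word : String)
    (n0 : Char) (ntl : List Char) :
    pvDFA (ch :: rest) prev word (n0 :: ntl) =
      (if ch = n0 then
        if ntl.isEmpty then pvDFA rest word word ntl else pvDFA rest prev word ntl
       else false) := rfl

-- Mid-word, if the input does not continue with the expected suffix, the automaton dies.
lemma pvDFA_dead : ∀ (need cs : List Char) (prev word : String), need ≠ [] →
    ¬ need.isPrefixOf cs → pvDFA cs prev word need = false := by
  intro need
  induction need with
  | nil => intro cs prev word h; exact absurd rfl h
  | cons n0 ntl ih =>
    intro cs prev word _ hnp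
    cases cs with
    | nil => simp [pvDFA]
    | cons c r =>
      rw [pvDFA_step_mid]
      by_cases hc : c = n0
      · subst hc
        cases ntl with
        | nil => exact absurd (by simp [List.isPrefixOf]) hnp
        | cons m mtl =>
          have hnp' : ¬ (m :: mtl).isPrefixOf r := by
            intro h; exact hnp (by simp [List.isPrefixOf, h])
          simp [ih r prev word (by simp) hnp']
      · simp [hc]

-- Mid-word, consuming exactly the expected suffix completes the word.
lemma pvDFA_consume : ∀ (need rest : List Char) (prev word : String), need ≠ [] →
    pvDFA (need ++ rest) prev word need = pvDFA rest word word [] := by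
  intro need
  induction need with
  | nil => intro rest prev word h; exact absurd rfl h
  | cons n0 ntl ih =>
    intro rest prev word _
    rw [List.cons_append, pvDFA_step_mid]
    cases ntl with
    | nil => simp
    | cons m mtl => simpa using ih rest prev word (by simp)

-- The automaton from a token boundary computes exactly A's word-level loop.
lemma pvDFA_eq_loopA : ∀ (n : ℕ) (cs : List Char) (prev word : String), cs.length ≤ n →
    pvDFA cs prev word [] = pvLoopA cs prev := by
  intro n
  induction n with
  | zero =>
    intro cs prev word hlen
    have : cs = [] := List.eq_nil_of_length_eq_zero (by omega)
    subst this
    simp [pvDFA, pvLoopA]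
  | succ n ih =>
    intro cs prev word hlen
    cases cs with
    | nil => simp [pvDFA, pvLoopA]
    | cons c cs' =>
      rw [pvDFA_step_start]
      by_cases hca : c = 'a'
      · subst hca
        by_cases hprev : ("aya" : String) = prev
        · have htry : pvTryA ["aya", "ye", "woo", "ma"] prev ('a' :: cs') = none := by
            simp [pvTryA, ← hprev]
          rw [pvLoopA_step_none _ _ _ htry]
          simp [pvStarts, hprev]
        · by_cases hp : (['y', 'a'] : List Char).isPrefixOf cs'
          · obtain ⟨r, rfl⟩ := List.isPrefixOf_iff_prefix.mp hp
            simp only [List.cons_append, List.nil_append]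
            have htry : pvTryA ["aya", "ye", "woo", "ma"] prev ('a' :: 'y' :: 'a' :: r)
                = some ("aya", r) := by
              simp [pvTryA, hprev, List.isPrefixOf]
            rw [pvLoopA_step_some _ _ _ _ _ htry]
            have hc := pvDFA_consume ['y', 'a'] r prev "aya" (by simp)
            simp only [List.cons_append, List.nil_append] at hc
            have hr : r.length ≤ n := by simp at hlen; omega
            simp only [pvStarts]
            simpa [hc, hprev] using ih r "aya" "aya" hr
          · have htry : pvTryA ["aya", "ye", "woo", "ma"] prev ('a' :: cs') = none := by
              simp [pvTryA, hprev, List.isPrefixOf, hp]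
            rw [pvLoopA_step_none _ _ _ htry]
            simp only [pvStarts]
            simpa [hprev] using pvDFA_dead ['y', 'a'] cs' prev "aya" (by simp) hp
      · by_cases hcy : c = 'y'
        · subst hcy
          by_cases hprev : ("ye" : String) = prev
          · have htry : pvTryA ["aya", "ye", "woo", "ma"] prev ('y' :: cs') = none := by
              simp [pvTryA, ← hprev]
            rw [pvLoopA_step_none _ _ _ htry]
            simp [pvStarts, hprev]
          · by_cases hp : (['e'] : List Char).isPrefixOf cs'
            · obtain ⟨r, rfl⟩ := List.isPrefixOf_iff_prefix.mp hp
              simp only [List.cons_append, List.nil_append]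
              have htry : pvTryA ["aya", "ye", "woo", "ma"] prev ('y' :: 'e' :: r)
                  = some ("ye", r) := by
                simp [pvTryA, hprev, List.isPrefixOf]
              rw [pvLoopA_step_some _ _ _ _ _ htry]
              have hc := pvDFA_consume ['e'] r prev "ye" (by simp)
              simp only [List.cons_append, List.nil_append] at hc
              have hr : r.length ≤ n := by simp at hlen; omega
              simp only [pvStarts, if_neg (by decide : ¬ 'y' = 'a')]
              simpa [hc, hprev] using ih r "ye" "ye" hr
            · have htry : pvTryA ["aya", "ye", "woo", "ma"] prev ('y' :: cs') = none := by
                simp [pvTryA, hprev, List.isPrefixOf, hp]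
              rw [pvLoopA_step_none _ _ _ htry]
              simp only [pvStarts, if_neg (by decide : ¬ 'y' = 'a')]
              simpa [hprev] using pvDFA_dead ['e'] cs' prev "ye" (by simp) hp
        · by_cases hcw : c = 'w'
          · subst hcw
            by_cases hprev : ("woo" : String) = prev
            · have htry : pvTryA ["aya", "ye", "woo", "ma"] prev ('w' :: cs') = none := by
                simp [pvTryA, ← hprev]
              rw [pvLoopA_step_none _ _ _ htry]
              simp [pvStarts, hprev]
            · by_cases hp : (['o', 'o'] : List Char).isPrefixOf cs'
              · obtain ⟨r, rfl⟩ := List.isPrefixOf_iff_prefix.mp hp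
                simp only [List.cons_append, List.nil_append]
                have htry : pvTryA ["aya", "ye", "woo", "ma"] prev ('w' :: 'o' :: 'o' :: r)
                    = some ("woo", r) := by
                  simp [pvTryA, hprev, List.isPrefixOf]
                rw [pvLoopA_step_some _ _ _ _ _ htry]
                have hc := pvDFA_consume ['o', 'o'] r prev "woo" (by simp)
                simp only [List.cons_append, List.nil_append] at hc
                have hr : r.length ≤ n := by simp at hlen; omega
                simp only [pvStarts, if_neg (by decide : ¬ 'w' = 'a'),
                  if_neg (by decide : ¬ 'w' = 'y')]
                simpa [hc, hprev] using ih r "woo" "woo" hr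
              · have htry : pvTryA ["aya", "ye", "woo", "ma"] prev ('w' :: cs') = none := by
                  simp [pvTryA, hprev, List.isPrefixOf, hp]
                rw [pvLoopA_step_none _ _ _ htry]
                simp only [pvStarts, if_neg (by decide : ¬ 'w' = 'a'),
                  if_neg (by decide : ¬ 'w' = 'y')]
                simpa [hprev] using pvDFA_dead ['o', 'o'] cs' prev "woo" (by simp) hp
          · by_cases hcm : c = 'm'
            · subst hcm
              by_cases hprev : ("ma" : String) = prev
              · have htry : pvTryA ["aya", "ye", "woo", "ma"] prev ('m' :: cs') = none := by
                  simp [pvTryA, ← hprev]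
                rw [pvLoopA_step_none _ _ _ htry]
                simp [pvStarts, hprev]
              · by_cases hp : (['a'] : List Char).isPrefixOf cs'
                · obtain ⟨r, rfl⟩ := List.isPrefixOf_iff_prefix.mp hp
                  simp only [List.cons_append, List.nil_append]
                  have htry : pvTryA ["aya", "ye", "woo", "ma"] prev ('m' :: 'a' :: r)
                      = some ("ma", r) := by
                    simp [pvTryA, hprev, List.isPrefixOf]
                  rw [pvLoopA_step_some _ _ _ _ _ htry]
                  have hc := pvDFA_consume ['a'] r prev "ma" (by simp)
                  simp only [List.cons_append, List.nil_append] at hc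
                  have hr : r.length ≤ n := by simp at hlen; omega
                  simp only [pvStarts, if_neg (by decide : ¬ 'm' = 'a'),
                    if_neg (by decide : ¬ 'm' = 'y'), if_neg (by decide : ¬ 'm' = 'w')]
                  simpa [hc, hprev] using ih r "ma" "ma" hr
                · have htry : pvTryA ["aya", "ye", "woo", "ma"] prev ('m' :: cs') = none := by
                    simp [pvTryA, hprev, List.isPrefixOf, hp]
                  rw [pvLoopA_step_none _ _ _ htry]
                  simp only [pvStarts, if_neg (by decide : ¬ 'm' = 'a'),
                    if_neg (by decide : ¬ 'm' = 'y'), if_neg (by decide : ¬ 'm' = 'w')]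
                  simpa [hprev] using pvDFA_dead ['a'] cs' prev "ma" (by simp) hp
            · have hca' : ¬ 'a' = c := fun h => hca h.symm
              have hcy' : ¬ 'y' = c := fun h => hcy h.symm
              have hcw' : ¬ 'w' = c := fun h => hcw h.symm
              have hcm' : ¬ 'm' = c := fun h => hcm h.symm
              have htry : pvTryA ["aya", "ye", "woo", "ma"] prev (c :: cs') = none := by
                by_cases h1 : ("aya" : String) = prev <;>
                  by_cases h2 : ("ye" : String) = prev <;>
                    by_cases h3 : ("woo" : String) = prev <;>
                      by_cases h4 : ("ma" : String) = prev <;>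
                        simp [pvTryA, h1, h2, h3, h4, List.isPrefixOf, hca', hcy', hcw', hcm']
              rw [pvLoopA_step_none _ _ _ htry]
              simp [pvStarts, hca, hcy, hcw, hcm]

lemma per_string (b : String) : pvDFA b.toList "" "" [] = pvLoopA b.toList "" :=
  pvDFA_eq_loopA b.toList.length b.toList "" "" le_rfl

-- ===== VERDICT (by name: the statement is the Claim_ definition above) =====
theorem solution_spec : Claim_equal_solution := by
  intro babbling _
  unfold Spec_solution solution solution_alt
  have hfun : (fun (answer : Int) (b : String) =>
        if pvLoopA b.toList "" then answer + 1 else answer)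
      = (fun (count : Int) (b : String) =>
          if pvDFA b.toList "" "" [] then count + 1 else count) := by
    funext answer b
    rw [per_string b]
  rw [hfun]
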